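-- pv_equiv track=rewrite | github.com/michaeldwong/efficientdet-madeye | evaluate_ranking_continual_learning.py | rank_orientations
-- ===== SOURCE A (Python) =====
-- def rank_orientations(orientation_to_count):
--     sorted_dict = {k: v for k, v in sorted(orientation_to_count.items(), key=lambda item: item[1] * -1)}
--     orientation_to_rank = {}
--     last_count = 0
--     rank = 0
--     for o in sorted_dict:
--         count = sorted_dict[o]
--         if count != last_count:
--             last_count = count
--             rank += 1
--         if rank == 0:
--             rank += 1
--         orientation_to_rank[o] = rank
--     return orientation_to_rank
-- ===== SOURCE B (Python) =====
-- def rank_orientations(orientation_to_count):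
--     # dense ranks: rank of a count = 1 + number of distinct counts strictly greater
--     items = sorted(orientation_to_count.items(), key=lambda it: -it[1])
--     distinct = sorted(set(orientation_to_count.values()), reverse=True)
--     count_to_rank = {c: i + 1 for i, c in enumerate(distinct)}
--     return {o: count_to_rank[c] for o, c in items}
-- ===== Notes on version B (the rewrite author's own statement) =====
-- stated objective: simpler
-- what changed: Replaces A's stateful sorted-order sweep (running rank, last_count, rank==0 guard) with a two-phase decomposition: build a dense-rank lookup table from the sorted distinct counts, then map each orientation through it.
import Mathlib
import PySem

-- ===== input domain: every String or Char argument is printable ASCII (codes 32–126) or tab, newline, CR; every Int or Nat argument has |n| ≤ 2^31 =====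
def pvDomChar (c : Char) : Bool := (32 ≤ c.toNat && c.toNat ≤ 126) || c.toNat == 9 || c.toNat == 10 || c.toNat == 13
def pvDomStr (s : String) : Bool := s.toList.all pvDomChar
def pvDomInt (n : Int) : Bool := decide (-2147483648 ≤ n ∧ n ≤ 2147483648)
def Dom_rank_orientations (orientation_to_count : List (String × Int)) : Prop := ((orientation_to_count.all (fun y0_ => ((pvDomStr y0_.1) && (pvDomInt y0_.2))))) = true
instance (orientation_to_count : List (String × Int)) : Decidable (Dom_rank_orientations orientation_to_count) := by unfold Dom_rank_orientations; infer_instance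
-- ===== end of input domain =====

-- B replaces A's single stateful sweep (running rank / last_count / rank==0 guard) with a
-- dense-rank table built from the sorted distinct counts, then a flat mapping pass (objective: simpler).

-- ===== PORT A =====
-- the body of A's 'for o in sorted_dict' loop; state = (orientation_to_rank, last_count, rank)
def pvAStep (st : PySem.Dict String Int × Int × Int) (oc : String × Int) : PySem.Dict String Int × Int × Int :=
  let count := oc.2
  let lr := if count ≠ st.2.1 then (count, st.2.2 + 1) else (st.2.1, st.2.2)
  let rank := if lr.2 = 0 then lr.2 + 1 else lr.2
  (st.1.insert oc.1 rank, lr.1, rank)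

def rank_orientations (orientation_to_count : List (String × Int)) : List (String × Int) :=
  let d := PySem.Dict.ofList orientation_to_count
  -- sorted_dict = {k: v for k, v in sorted(orientation_to_count.items(), key=lambda item: item[1] * -1)}
  let sorted_items := PySem.List.sorted d.items (fun item => item.2 * -1) false
  let sorted_dict := sorted_items.foldl (fun (sd : PySem.Dict String Int) kv => sd.insert kv.1 kv.2) PySem.Dict.empty
  -- for o in sorted_dict: count = sorted_dict[o] … — iterating the items pairs each key o with sorted_dict[o]
  let st := sorted_dict.items.foldl pvAStep (PySem.Dict.empty, 0, 0)
  st.1.items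

-- ===== PORT B =====
def rank_orientations_alt (orientation_to_count : List (String × Int)) : List (String × Int) :=
  let d := PySem.Dict.ofList orientation_to_count
  let items := PySem.List.sorted d.items (fun it => -it.2) false
  let distinct := PySem.List.sorted (PySem.Set.ofList d.values) (fun c => c) true
  -- count_to_rank = {c: i + 1 for i, c in enumerate(distinct)}
  let count_to_rank : PySem.Dict Int Int :=
    PySem.Dict.ofList ((PySem.List.enumerate distinct).map (fun ic => (ic.2, ic.1 + 1)))
  -- count_to_rank[c]: the key is always present, so the lookup is getD with any default
  items.map (fun oc => (oc.1, count_to_rank.getD oc.2 0))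

-- ===== PRECONDITION & SPEC =====
def Spec_rank_orientations (orientation_to_count : List (String × Int)) (out : List (String × Int)) : Prop := out = rank_orientations_alt orientation_to_count
instance (orientation_to_count : List (String × Int)) (out : List (String × Int)) : Decidable (Spec_rank_orientations orientation_to_count out) := by unfold Spec_rank_orientations; infer_instance

-- ===== CLAIM (what is proved, stated in full; the proofs are below) =====
def Claim_equal_rank_orientations : Prop := ∀ (orientation_to_count : List (String × Int)), Dom_rank_orientations orientation_to_count → Spec_rank_orientations orientation_to_count (rank_orientations orientation_to_count)

-- ===== LEMMAS AND PROOFS =====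

-- counting distinct values above a threshold steps by one when the threshold drops
-- from 'last' to 'c' over a gap containing no value
lemma pv_countP_step (D : List Int) (hD : D.Nodup) (c last : Int) (hcl : c < last)
    (hmem : last ∈ D) (hno : ∀ v ∈ D, ¬ (c < v ∧ v < last)) :
    D.countP (fun v => decide (c < v)) = D.countP (fun v => decide (last < v)) + 1 := by
  induction D with
  | nil => simp at hmem
  | cons a tl ih =>
    rcases List.nodup_cons.mp hD with ⟨hna, hnd⟩
    have htl : ∀ v ∈ tl, ¬ (c < v ∧ v < last) := fun v hv => hno v (List.mem_cons_of_mem _ hv)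
    by_cases ha : a = last
    · have hlast_not : last ∉ tl := ha ▸ hna
      have hcong : tl.countP (fun v => decide (c < v)) = tl.countP (fun v => decide (last < v)) := by
        apply List.countP_congr
        intro v hv
        have h1 := htl v hv
        have h2 : v ≠ last := fun h => hlast_not (h ▸ hv)
        simp only [decide_eq_true_eq]
        omega
      have hca : decide (c < a) = true := by simp only [decide_eq_true_eq]; omega
      have hla : decide (last < a) = false := by simp only [decide_eq_false_iff_not]; omega
      simp [hcong, hca, hla]
    · have hmem2 : last ∈ tl := by
        rcases List.mem_cons.mp hmem with h | h
        · exact absurd h.symm ha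
        · exact h
      have hnab : ¬ (c < a ∧ a < last) := hno a List.mem_cons_self
      have hiff : decide (c < a) = decide (last < a) := by
        simp only [decide_eq_decide]
        constructor <;> intro h <;> omega
      simp only [List.countP_cons, ih hnd hmem2 htl, hiff]
      split_ifs <;> omega

-- in a strictly decreasing list, the number of elements above l[i] is i
lemma pv_countP_gt_getElem (l : List Int) (hl : l.Pairwise (fun a b => b < a)) :
    ∀ (i : Nat) (h : i < l.length), l.countP (fun v => decide (l[i] < v)) = i := by
  induction l with
  | nil => intro i h; simp at h
  | cons a tl ih =>
    rcases List.pairwise_cons.mp hl with ⟨hfa, htl⟩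
    intro i h
    cases i with
    | zero =>
      simp only [List.getElem_cons_zero, List.countP_cons]
      simp
      exact fun v hv => le_of_lt (hfa v hv)
    | succ j =>
      have hj : j < tl.length := by simpa using h
      have hc : (a :: tl)[j+1] = tl[j] := rfl
      have hlt : decide (tl[j] < a) = true := by simp [hfa _ (List.getElem_mem hj)]
      rw [hc]
      simp only [List.countP_cons, ih htl j hj, hlt]
      simp

-- A's loop, after its first iteration: an invariant induction over the (non-increasingly
-- sorted) remaining items; D is the list of all distinct counts
lemma pv_loopA (D : List Int) (hD : D.Nodup) :
    ∀ (L : List (String × Int)) (acc : PySem.Dict String Int) (last : Int),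
      L.Pairwise (fun a b => b.2 ≤ a.2) →
      (∀ p ∈ L, p.2 ≤ last) →
      last ∈ D →
      (∀ p ∈ L, p.2 ∈ D) →
      (∀ v ∈ D, last ≤ v ∨ v ∈ L.map (·.2)) →
      (∀ p ∈ L, acc.contains p.1 = false) →
      (L.map (·.1)).Nodup →
      (L.foldl pvAStep (acc, last, 1 + (D.countP (fun v => decide (last < v)) : Int))).1.items
        = acc.items ++ L.map (fun p => (p.1, 1 + (D.countP (fun v => decide (p.2 < v)) : Int))) := by
  intro L
  induction L with
  | nil => intro acc last _ _ _ _ _ _ _; simp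
  | cons p tl ih =>
    intro acc last hsorted hle hlastD hvals hcover hfresh hnodup
    rcases List.pairwise_cons.mp hsorted with ⟨hfa, htl⟩
    have hple : p.2 ≤ last := hle p List.mem_cons_self
    have hpD : p.2 ∈ D := hvals p List.mem_cons_self
    have hcnt_nonneg : (0:Int) ≤ (D.countP (fun v => decide (last < v)) : Int) := Int.natCast_nonneg _
    -- the new count for p.2
    have hcnt : D.countP (fun v => decide (p.2 < v))
        = D.countP (fun v => decide (last < v)) + (if p.2 = last then 0 else 1) := by
      by_cases hpl : p.2 = last
      · simp [hpl]
      · have hlt : p.2 < last := lt_of_le_of_ne hple hpl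
        have hno : ∀ v ∈ D, ¬ (p.2 < v ∧ v < last) := by
          intro v hv ⟨h1, h2⟩
          rcases hcover v hv with h | h
          · omega
          · rcases List.mem_map.mp h with ⟨q, hq, hq2⟩
            rcases List.mem_cons.mp hq with rfl | hqtl
            · omega
            · have := hfa q hqtl
              omega
        simp [pv_countP_step D hD p.2 last hlt hlastD hno, hpl]
    have hstep : pvAStep (acc, last, 1 + (D.countP (fun v => decide (last < v)) : Int)) p
        = (acc.insert p.1 (1 + (D.countP (fun v => decide (p.2 < v)) : Int)), p.2,
           1 + (D.countP (fun v => decide (p.2 < v)) : Int)) := by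
      by_cases hpl : p.2 = last
      · simp only [pvAStep, hpl]
        have hne : ¬ (last ≠ last) := fun h => h rfl
        simp only [if_neg hne]
        have hr0 : ¬ (1 + (D.countP (fun v => decide (last < v)) : Int) = 0) := by omega
        simp [if_neg hr0]
      · simp only [pvAStep]
        have hne : p.2 ≠ last := hpl
        simp only [if_pos hne]
        have hr0 : ¬ (1 + (D.countP (fun v => decide (last < v)) : Int) + 1 = 0) := by omega
        simp only [if_neg hr0]
        have heq : 1 + (D.countP (fun v => decide (p.2 < v)) : Int)
            = 1 + (D.countP (fun v => decide (last < v)) : Int) + 1 := by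
          rw [hcnt]
          simp only [if_neg hpl]
          push_cast
          ring
        rw [heq]
    have hkey : p.1 ∉ tl.map (·.1) := (List.nodup_cons.mp hnodup).1
    have hfresh2 : ∀ q ∈ tl, (acc.insert p.1 (1 + (D.countP (fun v => decide (p.2 < v)) : Int))).contains q.1 = false := by
      intro q hq
      rw [PySem.Dict.contains_insert]
      have h1 : acc.contains q.1 = false := hfresh q (List.mem_cons_of_mem _ hq)
      have h2 : q.1 ≠ p.1 := fun h => hkey (h ▸ List.mem_map_of_mem hq)
      simp [h1, h2]
    have ihr := ih (acc.insert p.1 (1 + (D.countP (fun v => decide (p.2 < v)) : Int))) p.2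
      htl hfa hpD (fun q hq => hvals q (List.mem_cons_of_mem _ hq))
      (by
        intro v hv
        rcases hcover v hv with h | h
        · exact Or.inl (le_trans hple h)
        · rcases List.mem_map.mp h with ⟨q, hq, hq2⟩
          rcases List.mem_cons.mp hq with rfl | hqtl
          · exact Or.inl (le_of_eq hq2)
          · exact Or.inr (hq2 ▸ List.mem_map_of_mem hqtl))
      hfresh2 (List.nodup_cons.mp hnodup).2
    have hacc : (acc.insert p.1 (1 + (D.countP (fun v => decide (p.2 < v)) : Int))).items
        = acc.items ++ [(p.1, 1 + (D.countP (fun v => decide (p.2 < v)) : Int))] :=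
      PySem.Dict.items_insert_of_not_contains _ _ (hfresh p List.mem_cons_self)
    calc ((p :: tl).foldl pvAStep (acc, last, 1 + (D.countP (fun v => decide (last < v)) : Int))).1.items
        = (tl.foldl pvAStep (acc.insert p.1 (1 + (D.countP (fun v => decide (p.2 < v)) : Int)), p.2,
            1 + (D.countP (fun v => decide (p.2 < v)) : Int))).1.items := by rw [List.foldl_cons, hstep]
      _ = acc.items ++ (p :: tl).map (fun p => (p.1, 1 + (D.countP (fun v => decide (p.2 < v)) : Int))) := by
            rw [ihr, hacc]; simp

-- the dense-rank table of B assigns 1 + (number of distinct counts above c) to c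
lemma pv_table (D : List Int) (hD : D.Nodup) (c : Int) (hc : c ∈ D) :
    (PySem.Dict.ofList ((PySem.List.enumerate (PySem.List.sorted D (fun c => c) true)).map
        (fun ic => (ic.2, ic.1 + 1)))).getD c 0
      = 1 + (D.countP (fun v => decide (c < v)) : Int) := by
  have hdperm : (PySem.List.sorted D (fun c => c) true).Perm D := PySem.List.sorted_perm D _ _
  have hdnodup : (PySem.List.sorted D (fun c => c) true).Nodup := hdperm.nodup_iff.mpr hD
  have hdpair : (PySem.List.sorted D (fun c => c) true).Pairwise (fun a b => b < a) := by
    have h1 : (PySem.List.sorted D (fun c => c) true).Pairwise (fun a b : Int => b ≤ a) :=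
      PySem.List.sorted_pairwise_rev D (fun c => c)
    have h2 : (PySem.List.sorted D (fun c => c) true).Pairwise (fun a b : Int => a ≠ b) := hdnodup
    exact (h1.and h2).imp (fun h => lt_of_le_of_ne h.1 (Ne.symm h.2))
  have hcmem : c ∈ PySem.List.sorted D (fun c => c) true := (PySem.List.mem_sorted D _ _ c).mpr hc
  rcases List.mem_iff_getElem.mp hcmem with ⟨i, hi, hieq⟩
  have hpairs_keys : (((PySem.List.enumerate (PySem.List.sorted D (fun c => c) true)).map
      (fun ic => (ic.2, ic.1 + 1))).map (fun p => p.1)) = PySem.List.sorted D (fun c => c) true := by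
    rw [List.map_map]
    exact PySem.List.map_snd_enumerate _ 0
  have hitems : (PySem.Dict.ofList ((PySem.List.enumerate (PySem.List.sorted D (fun c => c) true)).map
      (fun ic => (ic.2, ic.1 + 1)))).items
      = (PySem.List.enumerate (PySem.List.sorted D (fun c => c) true)).map (fun ic => (ic.2, ic.1 + 1)) := by
    have h := PySem.Dict.items_foldl_insert_fresh
      ((PySem.List.enumerate (PySem.List.sorted D (fun c => c) true)).map (fun ic => (ic.2, ic.1 + 1)))
      (fun p => p.1) (fun p => p.2) PySem.Dict.empty
      (fun a _ => by simp) (by rw [hpairs_keys]; exact hdnodup)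
    simpa using h
  have hmemitem : (c, (i : Int) + 1) ∈ (PySem.Dict.ofList ((PySem.List.enumerate (PySem.List.sorted D (fun c => c) true)).map
      (fun ic => (ic.2, ic.1 + 1)))).items := by
    rw [hitems]
    apply List.mem_map_of_mem (f := fun ic => (ic.2, ic.1 + 1)) (a := ((i : Int), c))
    rw [PySem.List.mem_enumerate_iff]
    exact ⟨i, hi, by simp [hieq]⟩
  have hkeysnd : (PySem.Dict.ofList ((PySem.List.enumerate (PySem.List.sorted D (fun c => c) true)).map
      (fun ic => (ic.2, ic.1 + 1)))).keys.Nodup := by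
    show ((PySem.Dict.ofList _).items.map (fun p => p.1)).Nodup
    rw [hitems, hpairs_keys]
    exact hdnodup
  rw [PySem.Dict.getD_of_mem_items _ hmemitem hkeysnd 0]
  have hcount : (PySem.List.sorted D (fun c => c) true).countP (fun v => decide (c < v)) = i := by
    have := pv_countP_gt_getElem (PySem.List.sorted D (fun c => c) true) hdpair i hi
    rwa [hieq] at this
  rw [← hdperm.countP_eq, hcount]
  omega

-- A's port evaluates to the dense-rank map over the sorted items
lemma pv_A_eq (x : List (String × Int)) :
    rank_orientations x
      = (PySem.List.sorted (PySem.Dict.ofList x).items (fun item => item.2 * -1) false).map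
          (fun p => (p.1, 1 + (((PySem.Set.ofList (PySem.Dict.ofList x).values).countP
            (fun v => decide (p.2 < v)) : Nat) : Int))) := by
  have hkeysI : ((PySem.Dict.ofList x).items.map (fun p => p.1)).Nodup :=
    PySem.Dict.nodup_keys_ofList x
  have hperm : (PySem.List.sorted (PySem.Dict.ofList x).items (fun item => item.2 * -1) false).Perm
      (PySem.Dict.ofList x).items := PySem.List.sorted_perm _ _ _
  have hLkeys : ((PySem.List.sorted (PySem.Dict.ofList x).items (fun item => item.2 * -1) false).map
      (fun p => p.1)).Nodup := ((hperm.map _).nodup_iff).mpr hkeysI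
  have hsd : ((PySem.List.sorted (PySem.Dict.ofList x).items (fun item => item.2 * -1) false).foldl
        (fun (sd : PySem.Dict String Int) kv => sd.insert kv.1 kv.2) PySem.Dict.empty).items
      = PySem.List.sorted (PySem.Dict.ofList x).items (fun item => item.2 * -1) false := by
    have h := PySem.Dict.items_foldl_insert_fresh
      (PySem.List.sorted (PySem.Dict.ofList x).items (fun item => item.2 * -1) false)
      (fun p => p.1) (fun p => p.2) PySem.Dict.empty (fun a _ => by simp) hLkeys
    simpa using h
  have hsorted : (PySem.List.sorted (PySem.Dict.ofList x).items (fun item => item.2 * -1) false).Pairwise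
      (fun a b => b.2 ≤ a.2) := by
    have h := PySem.List.sorted_pairwise (PySem.Dict.ofList x).items (fun item => item.2 * -1)
    exact h.imp (fun hab => by omega)
  have hD : (PySem.Set.ofList (PySem.Dict.ofList x).values).Nodup := PySem.Set.nodup_ofList _
  have hvalsmem : ∀ p ∈ PySem.List.sorted (PySem.Dict.ofList x).items (fun item => item.2 * -1) false,
      p.2 ∈ PySem.Set.ofList (PySem.Dict.ofList x).values := by
    intro p hp
    rw [PySem.Set.mem_ofList]
    exact List.mem_map_of_mem (hperm.mem_iff.mp hp)
  have hcover0 : ∀ v ∈ PySem.Set.ofList (PySem.Dict.ofList x).values,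
      v ∈ (PySem.List.sorted (PySem.Dict.ofList x).items (fun item => item.2 * -1) false).map (fun p => p.2) := by
    intro v hv
    rw [PySem.Set.mem_ofList] at hv
    exact ((hperm.map (fun p => p.2)).mem_iff).mpr hv
  show ((PySem.List.sorted (PySem.Dict.ofList x).items (fun item => item.2 * -1) false).foldl
        (fun (sd : PySem.Dict String Int) kv => sd.insert kv.1 kv.2) PySem.Dict.empty).items.foldl
        pvAStep (PySem.Dict.empty, 0, 0) |>.1.items = _
  rw [hsd]
  cases hLc : PySem.List.sorted (PySem.Dict.ofList x).items (fun item => item.2 * -1) false with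
  | nil => rfl
  | cons p tl =>
    rw [hLc] at hsorted hLkeys hvalsmem hcover0
    rcases List.pairwise_cons.mp hsorted with ⟨hfa, htl⟩
    have hpD : p.2 ∈ PySem.Set.ofList (PySem.Dict.ofList x).values := hvalsmem p List.mem_cons_self
    have hcnt0 : (PySem.Set.ofList (PySem.Dict.ofList x).values).countP (fun v => decide (p.2 < v)) = 0 := by
      apply List.countP_eq_zero.mpr
      intro v hv
      rcases List.mem_cons.mp (hcover0 v hv) with h | h
      · simp [h]
      · rcases List.mem_map.mp h with ⟨q, hq, hq2⟩
        have := hfa q hq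
        simp only [decide_eq_true_eq] at *
        omega
    have hstep0 : pvAStep (PySem.Dict.empty, 0, 0) p
        = (PySem.Dict.empty.insert p.1 (1 + (((PySem.Set.ofList (PySem.Dict.ofList x).values).countP
            (fun v => decide (p.2 < v)) : Nat) : Int)), p.2,
            1 + (((PySem.Set.ofList (PySem.Dict.ofList x).values).countP
            (fun v => decide (p.2 < v)) : Nat) : Int)) := by
      rw [hcnt0]
      by_cases hp0 : p.2 = 0
      · simp [pvAStep, hp0]
      · simp [pvAStep, hp0]
    have hfresh : ∀ q ∈ tl, (PySem.Dict.empty.insert p.1 (1 + (((PySem.Set.ofList (PySem.Dict.ofList x).values).countP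
        (fun v => decide (p.2 < v)) : Nat) : Int))).contains q.1 = false := by
      intro q hq
      rw [PySem.Dict.contains_insert]
      have h2 : q.1 ≠ p.1 := fun h =>
        (List.nodup_cons.mp hLkeys).1 (by simp only []; rw [← h]; exact List.mem_map_of_mem hq)
      simp [h2]
    have hloop := pv_loopA (PySem.Set.ofList (PySem.Dict.ofList x).values) hD tl
      (PySem.Dict.empty.insert p.1 (1 + (((PySem.Set.ofList (PySem.Dict.ofList x).values).countP
        (fun v => decide (p.2 < v)) : Nat) : Int))) p.2
      htl hfa hpD (fun q hq => hvalsmem q (List.mem_cons_of_mem _ hq))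
      (by
        intro v hv
        rcases List.mem_cons.mp (hcover0 v hv) with h | h
        · exact Or.inl (le_of_eq h.symm)
        · exact Or.inr h)
      hfresh (List.nodup_cons.mp hLkeys).2
    rw [List.foldl_cons, hstep0, hloop,
        PySem.Dict.items_insert_of_not_contains _ _ (by simp)]
    simp
    rfl

-- B's port evaluates to the same dense-rank map over the same sorted items
lemma pv_B_eq (x : List (String × Int)) :
    rank_orientations_alt x
      = (PySem.List.sorted (PySem.Dict.ofList x).items (fun item => item.2 * -1) false).map
          (fun p => (p.1, 1 + (((PySem.Set.ofList (PySem.Dict.ofList x).values).countP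
            (fun v => decide (p.2 < v)) : Nat) : Int))) := by
  have hkey : (fun it : String × Int => -it.2) = (fun item : String × Int => item.2 * -1) :=
    funext fun it => by ring
  show (PySem.List.sorted (PySem.Dict.ofList x).items (fun it => -it.2) false).map _ = _
  rw [hkey]
  apply List.map_congr_left
  intro p hp
  have hpD : p.2 ∈ PySem.Set.ofList (PySem.Dict.ofList x).values := by
    rw [PySem.Set.mem_ofList]
    exact List.mem_map_of_mem ((PySem.List.sorted_perm _ _ _).mem_iff.mp hp)
  rw [pv_table (PySem.Set.ofList (PySem.Dict.ofList x).values) (PySem.Set.nodup_ofList _) p.2 hpD]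

-- ===== VERDICT (by name: the statement is the Claim_ definition above) =====
theorem rank_orientations_spec : Claim_equal_rank_orientations := by
  intro x _
  unfold Spec_rank_orientations
  rw [pv_A_eq, pv_B_eq]
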